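-- pv_equiv track=rewrite | github.com/ananas-dev/denis | betterDetection.py | getFlyingPiece
-- ===== SOURCE A (Python) =====
-- def getAllPieces(matrix: list) -> list:
--
--     # Fonction qui récupère toutes les pièces
--     # dans la matrice. Une pièce est un amas d'un même
--     # nombre. [!] Pas connectées en diagonale ! (Tetris)
--
--     def DFS(_matrix, _x, _y, value, visited=None):
--
--         if visited is None: visited = []
--         perms = [(1, 0), (0, 1), (-1, 0), (0, -1)]
--
--         for perm in perms:
--
--             tx, ty = _x + perm[0], _y + perm[1]
--             if tx >= 0 and tx < len(_matrix[0]) and ty >= 0 and ty < len(_matrix):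
--                 if (tx, ty) not in visited and _matrix[ty][tx] == value:
--                     new_visited = visited + [(tx, ty)]
--                     visited = DFS(_matrix, tx, ty, value, new_visited)
--
--         return visited
--
--     visited = []; pieces = []
--
--     for y, row in enumerate(matrix):
--         for x, case in enumerate(row):
--
--             if case != 0 and (x, y) not in visited:
--                 piece = DFS(matrix, x, y, case, None)
--                 pieces.append(piece)
--                 for i in piece: visited.append(i)
--
--     return pieces
--
-- def getFlyingPiece(matrix: list) -> bool:
--
--     # Fonction récupèrant la pièce volante dans
--     # la matrice.
--
--     pieces = getAllPieces(matrix)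
--
--     def lineariser(coords: list) -> list:
--
--         coords = sorted(coords, key=lambda coord: coord[0])
--         linearized_coords = []
--         current_x = None
--         max_y = float('-inf')
--
--         for coord in coords:
--             x, y = coord
--             if x != current_x:
--                 if current_x is not None:
--                     linearized_coords.append((current_x, max_y))
--                 current_x = x
--                 max_y = y
--             else:
--                 max_y = max(max_y, y)
--
--         if current_x is not None:
--             linearized_coords.append((current_x, max_y))
--         return linearized_coords
--
--     for p in pieces:
--
--         flying = True; linear_coordinates = lineariser(p)
--
--         for i in linear_coordinates:
--             # On va vérifier qu'il y'a des 0 sous toutes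
--             # les coordonnées linéaires de la pièce.
--             if i[1] < len(matrix) - 1:
--                 if matrix[i[1]+1][i[0]] != 0:
--                     flying = False
--             else: flying = False
--         if flying: return p
--
--     return None
-- ===== SOURCE B (Python) =====
-- def getAllPieces(matrix: list) -> list:
--
--     # Identical piece extraction (the coordinate order of each piece
--     # depends on this exact DFS traversal, so it is kept as-is).
--
--     def DFS(_matrix, _x, _y, value, visited=None):
--
--         if visited is None: visited = []
--         perms = [(1, 0), (0, 1), (-1, 0), (0, -1)]
--
--         for perm in perms:
--
--             tx, ty = _x + perm[0], _y + perm[1]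
--             if tx >= 0 and tx < len(_matrix[0]) and ty >= 0 and ty < len(_matrix):
--                 if (tx, ty) not in visited and _matrix[ty][tx] == value:
--                     new_visited = visited + [(tx, ty)]
--                     visited = DFS(_matrix, tx, ty, value, new_visited)
--
--         return visited
--
--     visited = []; pieces = []
--
--     for y, row in enumerate(matrix):
--         for x, case in enumerate(row):
--
--             if case != 0 and (x, y) not in visited:
--                 piece = DFS(matrix, x, y, case, None)
--                 pieces.append(piece)
--                 for i in piece: visited.append(i)
--
--     return pieces
--
-- def getFlyingPiece(matrix: list) -> bool:
--
--     # Flying test per piece: one unsorted pass builds a dict mapping each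
--     # column to the lowest (max-y) cell of the piece in that column, then
--     # every such bottom cell must have an in-bounds empty cell below it.
--
--     height = len(matrix)
--
--     for p in getAllPieces(matrix):
--
--         bottoms = {}
--         for x, y in p:
--             bottoms[x] = max(bottoms.get(x, y), y)
--
--         if all(y < height - 1 and matrix[y + 1][x] == 0 for x, y in bottoms.items()):
--             return p
--
--     return None
-- ===== Notes on version B (the rewrite author's own statement) =====
-- stated objective: alternative
-- what changed: The per-piece flying test no longer sorts the piece by x and scans runs with current_x/max_y state; instead one unsorted pass builds a dict mapping each column to its lowest cell (max y), and the piece flies iff every such bottom cell has an in-bounds zero below it; piece extraction (DFS) is kept identical because the returned coordinate order depends on it.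
-- outside the precondition, e.g. on getFlyingPiece([[1, 0], [0]]): A returns [], B returns []
import Mathlib
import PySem

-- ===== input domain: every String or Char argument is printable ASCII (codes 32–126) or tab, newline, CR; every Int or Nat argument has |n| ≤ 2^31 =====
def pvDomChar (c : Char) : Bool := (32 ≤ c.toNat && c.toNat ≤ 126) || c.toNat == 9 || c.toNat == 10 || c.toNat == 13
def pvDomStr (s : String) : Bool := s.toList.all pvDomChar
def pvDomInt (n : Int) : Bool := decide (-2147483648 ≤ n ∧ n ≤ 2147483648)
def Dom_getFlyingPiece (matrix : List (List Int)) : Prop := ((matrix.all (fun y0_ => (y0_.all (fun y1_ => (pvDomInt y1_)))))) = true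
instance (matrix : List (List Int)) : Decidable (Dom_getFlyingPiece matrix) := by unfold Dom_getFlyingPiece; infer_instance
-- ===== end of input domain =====

-- B keeps the piece extraction identical (the piece's coordinate order depends on its DFS)
-- but replaces the per-piece sort-and-scan flying test by a single unsorted pass building a
-- column → lowest-cell dict that is then checked; objective: alternative (hash-grouping vs sorting).


-- ===== PORT A =====
-- shared helper getAllPieces (the Python module-level helper both A and B call, ported once)
def pvWidth (m : List (List Int)) : Int := (((PySem.List.pyGet? m 0).getD []).length : Int)

-- matrix[ty][tx]; exact where the Python index is in range (the guards in DFS keep it there)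
def pvCell (m : List (List Int)) (ty tx : Int) : Int :=
  ((PySem.List.pyGet? ((PySem.List.pyGet? m ty).getD []) tx).getD 0)

-- the recursive DFS; fuel only makes the recursion structural (H*W+1 exceeds the chain
-- length, which grows the distinct in-bounds visited list at every nested call)
def pvDFS (m : List (List Int)) : Nat → Int → Int → Int → List (Int × Int) → List (Int × Int)
  | 0, _, _, _, visited => visited
  | fuel + 1, x, y, value, visited =>
    [((1 : Int), (0 : Int)), (0, 1), (-1, 0), (0, -1)].foldl
      (fun visited perm =>
        let tx := x + perm.1
        let ty := y + perm.2
        if 0 ≤ tx ∧ tx < pvWidth m ∧ 0 ≤ ty ∧ ty < (m.length : Int) then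
          if (tx, ty) ∉ visited ∧ pvCell m ty tx = value then
            pvDFS m fuel tx ty value (visited ++ [(tx, ty)])
          else visited
        else visited)
      visited

def pvGetAllPieces (m : List (List Int)) : List (List (Int × Int)) :=
  ((PySem.List.enumerate m).foldl
    (fun (st : List (Int × Int) × List (List (Int × Int))) yrow =>
      (PySem.List.enumerate yrow.2).foldl
        (fun st xcase =>
          if xcase.2 ≠ 0 ∧ (xcase.1, yrow.1) ∉ st.1 then
            let piece := pvDFS m (m.length * (pvWidth m).toNat + 1) xcase.1 yrow.1 xcase.2 []
            (st.1 ++ piece, st.2 ++ [piece])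
          else st)
        st)
    ([], [])).2

-- lineariser's loop: current_x / max_y scan over the x-sorted coordinates
def pvLinLoop : List (Int × Int) → Option Int → Int → List (Int × Int) → List (Int × Int)
  | [], none, _, acc => acc
  | [], some cx, maxY, acc => acc ++ [(cx, maxY)]
  | c :: rest, none, _, acc => pvLinLoop rest (some c.1) c.2 acc
  | c :: rest, some cx, maxY, acc =>
    if c.1 ≠ cx then pvLinLoop rest (some c.1) c.2 (acc ++ [(cx, maxY)])
    else pvLinLoop rest (some cx) (max maxY c.2) acc

def pvLineariser (coords : List (Int × Int)) : List (Int × Int) :=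
  pvLinLoop (PySem.List.sorted coords (fun c => c.1)) none 0 []

def pvFlyA (m : List (List Int)) (p : List (Int × Int)) : Bool :=
  (pvLineariser p).foldl
    (fun flying i =>
      if i.2 < (m.length : Int) - 1 then
        if pvCell m (i.2 + 1) i.1 ≠ 0 then false else flying
      else false)
    true

def pvFirstFlyA (m : List (List Int)) : List (List (Int × Int)) → Option (List (Int × Int))
  | [] => none
  | p :: ps => if pvFlyA m p then some p else pvFirstFlyA m ps

def getFlyingPiece (matrix : List (List Int)) : Option (List (Int × Int)) :=
  pvFirstFlyA matrix (pvGetAllPieces matrix)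

-- ===== PORT B =====
-- one unsorted pass: dict column x ↦ max y seen in that column of the piece
def pvBottoms (p : List (Int × Int)) : PySem.Dict Int Int :=
  p.foldl (fun d c => d.insert c.1 (max (d.getD c.1 c.2) c.2)) PySem.Dict.empty

def pvFlyB (m : List (List Int)) (p : List (Int × Int)) : Bool :=
  (pvBottoms p).items.all
    (fun c => decide (c.2 < (m.length : Int) - 1) && (pvCell m (c.2 + 1) c.1 == 0))

def pvFirstFlyB (m : List (List Int)) : List (List (Int × Int)) → Option (List (Int × Int))
  | [] => none
  | p :: ps => if pvFlyB m p then some p else pvFirstFlyB m ps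

def getFlyingPiece_alt (matrix : List (List Int)) : Option (List (Int × Int)) :=
  pvFirstFlyB matrix (pvGetAllPieces matrix)

-- ===== PRECONDITION & SPEC =====
-- Pre_ excludes matrices in which some row is shorter than row 0 and some entry is nonzero:
-- the Python bounds-checks columns against len(matrix[0]) only, so indexing such a short row
-- in the DFS or in the final check raises IndexError (on the few such inputs where A still
-- happens to return because no piece reaches the short row, A and B agree but are excluded).
def Pre_getFlyingPiece (matrix : List (List Int)) : Prop :=
  (∀ row ∈ matrix, pvWidth matrix ≤ (row.length : Int)) ∨
  (∀ row ∈ matrix, ∀ c ∈ row, c = 0)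
instance (matrix : List (List Int)) : Decidable (Pre_getFlyingPiece matrix) := by
  unfold Pre_getFlyingPiece; infer_instance

def pvWitness_getFlyingPiece : List (List Int) := [[1, 0], [0, 0]]

def Spec_getFlyingPiece (matrix : List (List Int)) (out : Option (List (Int × Int))) : Prop := out = getFlyingPiece_alt matrix
instance (matrix : List (List Int)) (out : Option (List (Int × Int))) : Decidable (Spec_getFlyingPiece matrix out) := by unfold Spec_getFlyingPiece; infer_instance

-- ===== CLAIM (what is proved, stated in full; the proofs are below) =====
def Claim_equal_getFlyingPiece : Prop := ∀ (matrix : List (List Int)), Dom_getFlyingPiece matrix → Pre_getFlyingPiece matrix → Spec_getFlyingPiece matrix (getFlyingPiece matrix)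

-- ===== LEMMAS AND PROOFS =====

-- proof-side vocabulary -------------------------------------------------------

-- the cell test both flying checks apply to a (column, bottom y) pair
def pvGood (m : List (List Int)) (c : Int × Int) : Bool :=
  decide (c.2 < (m.length : Int) - 1) && (pvCell m (c.2 + 1) c.1 == 0)

-- running max of column x over t starting from y (value of A's max_y tracking)
def pvMFold (x y : Int) (t : List (Int × Int)) : Int :=
  t.foldl (fun mY c => if c.1 = x then max mY c.2 else mY) y

-- max y of column x in a list, as an Option
def pvColmax? (x : Int) : List (Int × Int) → Option Int
  | [] => none
  | c :: t => if c.1 = x then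
      some (match pvColmax? x t with | none => c.2 | some b => max c.2 b)
    else pvColmax? x t

-- run-grouping normal form of A's lineariser on a sorted list
def pvGroup : List (Int × Int) → List (Int × Int)
  | [] => []
  | c :: t => (c.1, pvMFold c.1 c.2 t) :: pvGroup (t.filter (fun a => a.1 ≠ c.1))
termination_by s => s.length
decreasing_by simp; simpa using List.length_filter_le _ t.attach

-- A-side ----------------------------------------------------------------------

theorem pvFlyFold (m : List (List Int)) (l : List (Int × Int)) : ∀ fl : Bool,
    l.foldl (fun flying i =>
      if i.2 < (m.length : Int) - 1 then
        if pvCell m (i.2 + 1) i.1 ≠ 0 then false else flying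
      else false) fl = (fl && l.all (pvGood m)) := by
  induction l with
  | nil => intro fl; simp
  | cons c t ih =>
    intro fl
    simp only [List.foldl_cons, List.all_cons, ih]
    have hstep : (if c.2 < (m.length : Int) - 1 then
        if pvCell m (c.2 + 1) c.1 ≠ 0 then false else fl
      else false) = (fl && pvGood m c) := by
      by_cases h1 : c.2 < (m.length : Int) - 1 <;>
        by_cases h2 : pvCell m (c.2 + 1) c.1 = 0 <;>
          simp [pvGood, h1, h2]
    rw [hstep, Bool.and_assoc]

theorem pvFlyA_eq_all (m : List (List Int)) (p : List (Int × Int)) :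
    pvFlyA m p = (pvLineariser p).all (pvGood m) := by
  unfold pvFlyA
  rw [pvFlyFold]
  simp

theorem pvMFold_of_no_key (x y : Int) (t : List (Int × Int))
    (h : ∀ a ∈ t, a.1 ≠ x) : pvMFold x y t = y := by
  induction t generalizing y with
  | nil => rfl
  | cons c r ih =>
    simp only [pvMFold, List.foldl_cons, if_neg (h c (List.mem_cons_self))]
    exact ih y (fun a ha => h a (List.mem_cons_of_mem _ ha))

theorem pvMFold_eq_colmax (x y : Int) (t : List (Int × Int)) :
    pvMFold x y t = match pvColmax? x t with | none => y | some b => max y b := by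
  induction t generalizing y with
  | nil => rfl
  | cons c r ih =>
    by_cases h : c.1 = x
    · have h1 : pvMFold x y (c :: r) = pvMFold x (max y c.2) r := by
        simp [pvMFold, if_pos h]
      rw [h1, ih, pvColmax?, if_pos h]
      rcases hr : pvColmax? x r with _ | b <;> simp [hr, max_assoc]
    · have h1 : pvMFold x y (c :: r) = pvMFold x y r := by
        simp [pvMFold, if_neg h]
      rw [h1, ih, pvColmax?, if_neg h]

theorem pvLinLoop_eq_group (t : List (Int × Int)) (cx maxY : Int) (acc : List (Int × Int))
    (hs : t.Pairwise (fun a b => a.1 ≤ b.1)) (hlb : ∀ a ∈ t, cx ≤ a.1) :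
    pvLinLoop t (some cx) maxY acc = acc ++ pvGroup ((cx, maxY) :: t) := by
  induction t generalizing cx maxY acc with
  | nil => simp [pvLinLoop, pvGroup, pvMFold]
  | cons c r ih =>
    rcases hs with _ | ⟨hcr, hsr⟩
    by_cases h : c.1 = cx
    · have : ¬ (c.1 ≠ cx) := by simpa using h
      rw [pvLinLoop, if_neg this, ih cx (max maxY c.2) acc hsr
        (fun a ha => le_trans (hlb c (List.mem_cons_self)) (h ▸ hcr a ha))]
      have hg : pvGroup ((cx, maxY) :: c :: r) =
          (cx, pvMFold cx (max maxY c.2) r) :: pvGroup (r.filter (fun a => a.1 ≠ cx)) := by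
        rw [pvGroup]
        have hfil : (c :: r).filter (fun a => a.1 ≠ cx) = r.filter (fun a => a.1 ≠ cx) := by
          simp [List.filter_cons, h]
        rw [hfil]
        have : pvMFold cx maxY (c :: r) = pvMFold cx (max maxY c.2) r := by
          simp [pvMFold, List.foldl_cons, if_pos h]
        rw [this]
      rw [hg, pvGroup]
    · have hne : ∀ a ∈ c :: r, a.1 ≠ cx := by
        intro a ha
        rcases List.mem_cons.mp ha with rfl | ha'
        · exact h
        · have h1 : cx < c.1 := lt_of_le_of_ne (hlb c (List.mem_cons_self)) (Ne.symm h)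
          have h2 : c.1 ≤ a.1 := hcr a ha'
          omega
      rw [pvLinLoop, if_pos h, ih c.1 c.2 (acc ++ [(cx, maxY)]) hsr hcr]
      have hg : pvGroup ((cx, maxY) :: c :: r) = (cx, maxY) :: pvGroup (c :: r) := by
        rw [pvGroup]
        have h1 : pvMFold cx maxY (c :: r) = maxY := pvMFold_of_no_key cx maxY _ hne
        have h2 : (c :: r).filter (fun a => a.1 ≠ cx) = c :: r :=
          List.filter_eq_self.mpr (fun a ha => by simpa using hne a ha)
        rw [h1, h2]
      rw [hg]
      simp

theorem pvLineariser_eq_group (p : List (Int × Int)) :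
    pvLineariser p = pvGroup (PySem.List.sorted p (fun c => c.1)) := by
  unfold pvLineariser
  have hp := PySem.List.sorted_pairwise p (fun c => c.1)
  rcases hsort : PySem.List.sorted p (fun c => c.1) with _ | ⟨c, r⟩
  · simp [pvLinLoop, pvGroup]
  · rw [hsort] at hp
    rcases hp with _ | ⟨hcr, hsr⟩
    rw [pvLinLoop, pvLinLoop_eq_group r c.1 c.2 [] hsr hcr]
    simp

theorem pvColmax?_eq_none_iff (x : Int) (t : List (Int × Int)) :
    pvColmax? x t = none ↔ ∀ a ∈ t, a.1 ≠ x := by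
  induction t with
  | nil => simp [pvColmax?]
  | cons c r ih =>
    by_cases h : c.1 = x
    · rw [pvColmax?, if_pos h]
      simp only [List.mem_cons]
      constructor
      · intro hfalse; cases hfalse
      · intro hall; exact absurd h (hall c (Or.inl rfl))
    · rw [pvColmax?, if_neg h, ih]
      constructor
      · intro hall a ha
        rcases List.mem_cons.mp ha with rfl | ha'
        · exact h
        · exact hall a ha'
      · intro hall a ha; exact hall a (List.mem_cons_of_mem _ ha)

theorem pvColmax?_filter_ne (x k : Int) (t : List (Int × Int)) (h : x ≠ k) :
    pvColmax? x (t.filter (fun a => a.1 ≠ k)) = pvColmax? x t := by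
  induction t with
  | nil => rfl
  | cons c r ih =>
    by_cases hc : c.1 = k
    · have : ¬ (c.1 ≠ k) := by simpa using hc
      rw [List.filter_cons, if_neg (by simpa using hc)]
      rw [pvColmax?, if_neg (by rw [hc]; exact Ne.symm h), ih]
    · rw [List.filter_cons, if_pos (by simpa using hc)]
      rw [pvColmax?, pvColmax?, ih]

theorem pvGroup_mem_aux : ∀ (n : Nat) (s : List (Int × Int)), s.length ≤ n →
    ∀ x v : Int, ((x, v) ∈ pvGroup s ↔ pvColmax? x s = some v) := by
  intro n
  induction n with
  | zero =>
    intro s hs x v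
    rw [List.length_eq_zero_iff.mp (Nat.le_zero.mp hs)]
    simp [pvGroup, pvColmax?]
  | succ n ihn =>
    intro s hs x v
    rcases s with _ | ⟨⟨cx, cy⟩, t⟩
    · simp [pvGroup, pvColmax?]
    · have hlen : (t.filter (fun a => a.1 ≠ cx)).length ≤ n := by
        have := List.length_filter_le (fun a => a.1 ≠ cx) t
        simp at hs
        omega
      have ih := ihn (t.filter (fun a => a.1 ≠ cx)) hlen
      rw [pvGroup]
      by_cases h : cx = x
      · simp only [h] at ih ⊢
        have hnone : pvColmax? x (t.filter (fun a => a.1 ≠ x)) = none :=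
          (pvColmax?_eq_none_iff _ _).mpr
            (by intro a ha; simpa using (List.mem_filter.mp ha).2)
        constructor
        · intro hm
          rcases List.mem_cons.mp hm with heq | hm'
          · have hv : v = pvMFold x cy t := congrArg Prod.snd heq
            rw [pvColmax?, if_pos rfl, hv, pvMFold_eq_colmax]
          · have hcontra := (ih x v).mp hm'
            rw [hnone] at hcontra
            simp at hcontra
        · intro hsome
          rw [pvColmax?, if_pos rfl] at hsome
          have hv := Option.some.inj hsome
          apply List.mem_cons.mpr
          left
          have hmv : pvMFold x cy t = v := by
            rw [pvMFold_eq_colmax]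
            exact hv
          rw [hmv]
      · rw [pvColmax?, if_neg h]
        rw [← pvColmax?_filter_ne x cx t (fun hh => h hh.symm), List.mem_cons]
        constructor
        · rintro (heq | hm')
          · exact absurd (congrArg Prod.fst heq).symm h
          · exact (ih x v).mp hm'
        · intro hsome
          exact Or.inr ((ih x v).mpr hsome)

theorem pvGroup_mem (s : List (Int × Int)) (x v : Int) :
    (x, v) ∈ pvGroup s ↔ pvColmax? x s = some v :=
  pvGroup_mem_aux s.length s le_rfl x v

theorem pvColmax?_perm {s t : List (Int × Int)} (h : s.Perm t) (x : Int) :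
    pvColmax? x s = pvColmax? x t := by
  induction h with
  | nil => rfl
  | cons c _ ih => simp only [pvColmax?, ih]
  | swap a b l =>
    by_cases ha : a.1 = x <;> by_cases hb : b.1 = x <;>
      rcases hr : pvColmax? x l with _ | w <;>
        simp [pvColmax?, ha, hb, hr, max_comm, max_left_comm]
  | trans _ _ ih1 ih2 => rw [ih1, ih2]

-- B-side ----------------------------------------------------------------------

theorem pvBottoms_get? (p : List (Int × Int)) (d : PySem.Dict Int Int) (x : Int) :
    (p.foldl (fun d c => d.insert c.1 (max (d.getD c.1 c.2) c.2)) d).get? x =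
      match d.get? x, pvColmax? x p with
      | none, r => r
      | some a, none => some a
      | some a, some b => some (max a b) := by
  induction p generalizing d with
  | nil => rcases hd : d.get? x with _ | a <;> simp [hd, pvColmax?]
  | cons c t ih =>
    rcases c with ⟨cx, cy⟩
    rw [List.foldl_cons, ih]
    rw [PySem.Dict.getD_eq_get?_getD, PySem.Dict.get?_insert]
    by_cases h : cx = x
    · cases h
      rw [if_pos rfl, pvColmax?, if_pos rfl]
      rcases hd : d.get? x with _ | a <;>
        rcases hr : pvColmax? x t with _ | b <;> simp [hd, hr, max_assoc]
    · rw [if_neg (fun hh => h hh.symm), pvColmax?, if_neg h]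

theorem pvBottoms_items_mem (p : List (Int × Int)) (x v : Int) :
    (x, v) ∈ (pvBottoms p).items ↔ pvColmax? x p = some v := by
  have hnd : (pvBottoms p).keys.Nodup := by
    unfold pvBottoms
    exact PySem.Dict.nodup_keys_foldl_insert_key p (fun c => c.1)
      (fun d c => max (d.getD c.1 c.2) c.2) PySem.Dict.empty (by simp)
  rw [← PySem.Dict.get?_eq_some_iff_mem_items _ _ _ hnd]
  unfold pvBottoms
  rw [pvBottoms_get? p PySem.Dict.empty x]
  simp [PySem.Dict.get?_empty]

-- assembly --------------------------------------------------------------------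

theorem pvFly_eq (m : List (List Int)) (p : List (Int × Int)) :
    pvFlyA m p = pvFlyB m p := by
  rw [pvFlyA_eq_all, pvLineariser_eq_group]
  have hmem : ∀ z : Int × Int,
      z ∈ pvGroup (PySem.List.sorted p (fun c => c.1)) ↔ z ∈ (pvBottoms p).items := by
    intro z
    rcases z with ⟨x, v⟩
    rw [pvGroup_mem, pvBottoms_items_mem,
      pvColmax?_perm (PySem.List.sorted_perm p (fun c => c.1) false) x]
  have : pvFlyB m p = (pvBottoms p).items.all (pvGood m) := rfl
  rw [this, Bool.eq_iff_iff, List.all_eq_true, List.all_eq_true]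
  constructor
  · intro h z hz; exact h z ((hmem z).mpr hz)
  · intro h z hz; exact h z ((hmem z).mp hz)

theorem pvFirstFly_eq (m : List (List Int)) (ps : List (List (Int × Int))) :
    pvFirstFlyA m ps = pvFirstFlyB m ps := by
  induction ps with
  | nil => rfl
  | cons p t ih => rw [pvFirstFlyA, pvFirstFlyB, pvFly_eq, ih]

-- ===== VERDICT (by name: the statement is the Claim_ definition above) =====
theorem getFlyingPiece_spec : Claim_equal_getFlyingPiece := by
  intro matrix _ _
  unfold Spec_getFlyingPiece getFlyingPiece getFlyingPiece_alt
  exact pvFirstFly_eq matrix (pvGetAllPieces matrix)
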